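-- pv_equiv track=rewrite | github.com/BrodyKretz/Law... | extractors.py | extract_verdict
-- ===== SOURCE A (Python) =====
-- def extract_verdict(text):
--     """Extract verdict from text"""
--     text_lower = text.lower()
--
--     if any(phrase in text_lower for phrase in ['found guilty', 'convicted of', 'guilty verdict', 'conviction for']):
--         return "Guilty"
--     elif any(phrase in text_lower for phrase in ['not guilty', 'acquitted', 'acquittal', 'charges dismissed']):
--         return "Not Guilty"
--     elif any(phrase in text_lower for phrase in ['plea deal', 'plea bargain', 'pled guilty', 'pleaded guilty', 'guilty plea']):
--         return "Plea Deal"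
--     elif 'mistrial' in text_lower:
--         return "Mistrial"
--     elif any(phrase in text_lower for phrase in ['sentenced to', 'prison term', 'jail time']):
--         return "Guilty"  # If sentenced, they were found guilty
--
--     return "Unknown"
-- ===== SOURCE B (Python) =====
-- LABELS = ["Guilty", "Not Guilty", "Plea Deal", "Mistrial", "Guilty"]
-- PHRASES = [
--     ("found guilty", 0), ("convicted of", 0), ("guilty verdict", 0), ("conviction for", 0),
--     ("not guilty", 1), ("acquitted", 1), ("acquittal", 1), ("charges dismissed", 1),
--     ("plea deal", 2), ("plea bargain", 2), ("pled guilty", 2), ("pleaded guilty", 2), ("guilty plea", 2),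
--     ("mistrial", 3),
--     ("sentenced to", 4), ("prison term", 4), ("jail time", 4),
-- ]
--
-- def extract_verdict(text):
--     """Extract verdict: a single position-major scan of the text. At each index
--     we check which phrases start there and keep the minimum matched priority
--     group; at the end that minimum is mapped to its label. Correct because a
--     (non-empty) phrase occurs in the text iff it starts at some index, and the
--     original cascade returns the label of the lowest-numbered matching group."""
--     t = text.lower()
--     best = 5
--     for i in range(len(t)):
--         for phrase, group in PHRASES:
--             if group < best and t.startswith(phrase, i):
--                 best = group
--     return LABELS[best] if best < 5 else "Unknown"
-- ===== Notes on version B (the rewrite author's own statement) =====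
-- stated objective: alternative
-- what changed: Replaced the phrase-major if/elif cascade of whole-text substring tests by a single position-major scan: at each text index it checks which phrases start there and tracks the minimum matched priority group, which is mapped to its label at the end.
import Mathlib
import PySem

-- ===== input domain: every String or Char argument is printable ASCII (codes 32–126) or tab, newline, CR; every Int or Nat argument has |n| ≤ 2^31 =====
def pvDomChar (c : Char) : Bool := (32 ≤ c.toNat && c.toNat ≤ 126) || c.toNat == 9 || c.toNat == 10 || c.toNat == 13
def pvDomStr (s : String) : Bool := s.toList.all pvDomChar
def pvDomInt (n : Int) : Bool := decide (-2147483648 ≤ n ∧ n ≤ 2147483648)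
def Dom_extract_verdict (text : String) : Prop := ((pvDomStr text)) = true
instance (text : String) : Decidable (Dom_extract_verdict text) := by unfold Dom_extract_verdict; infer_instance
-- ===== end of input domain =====

-- B replaces A's phrase-major if/elif cascade by a single position-major scan of the
-- text tracking the minimum matched priority group (objective: alternative).

-- ===== PORT A =====
def extract_verdict (text : String) : String :=
  let text_lower := PySem.Str.lower text
  if ["found guilty", "convicted of", "guilty verdict", "conviction for"].any
      (fun phrase => PySem.Str.isIn phrase text_lower) then "Guilty"
  else if ["not guilty", "acquitted", "acquittal", "charges dismissed"].any
      (fun phrase => PySem.Str.isIn phrase text_lower) then "Not Guilty"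
  else if ["plea deal", "plea bargain", "pled guilty", "pleaded guilty", "guilty plea"].any
      (fun phrase => PySem.Str.isIn phrase text_lower) then "Plea Deal"
  else if PySem.Str.isIn "mistrial" text_lower then "Mistrial"
  else if ["sentenced to", "prison term", "jail time"].any
      (fun phrase => PySem.Str.isIn phrase text_lower) then "Guilty"
  else "Unknown"

-- ===== PORT B =====
def pvPhrases : List (String × Nat) :=
  [("found guilty", 0), ("convicted of", 0), ("guilty verdict", 0), ("conviction for", 0),
   ("not guilty", 1), ("acquitted", 1), ("acquittal", 1), ("charges dismissed", 1),
   ("plea deal", 2), ("plea bargain", 2), ("pled guilty", 2), ("pleaded guilty", 2), ("guilty plea", 2),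
   ("mistrial", 3),
   ("sentenced to", 4), ("prison term", 4), ("jail time", 4)]

def pvLabels : List String := ["Guilty", "Not Guilty", "Plea Deal", "Mistrial", "Guilty"]

-- 't.startswith(phrase, i)' for 0 ≤ i is exactly prefix-of-drop on the char list;
-- 'range(len(t))' is List.range; 'LABELS[best]' with best < 5 is getD (exact here).
def extract_verdict_alt (text : String) : String :=
  let t := PySem.Str.lower text
  let tl := t.toList
  let best := (List.range tl.length).foldl
    (fun best i => pvPhrases.foldl
      (fun best pg => if pg.2 < best ∧ pg.1.toList.isPrefixOf (tl.drop i) then pg.2 else best)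
      best) 5
  if best < 5 then pvLabels.getD best "Unknown" else "Unknown"

-- ===== PRECONDITION & SPEC =====
def Spec_extract_verdict (text : String) (out : String) : Prop := out = extract_verdict_alt text
instance (text : String) (out : String) : Decidable (Spec_extract_verdict text out) := by unfold Spec_extract_verdict; infer_instance

-- ===== CLAIM (what is proved, stated in full; the proofs are below) =====
def Claim_equal_extract_verdict : Prop := ∀ (text : String), Dom_extract_verdict text → Spec_extract_verdict text (extract_verdict text)

-- ===== LEMMAS AND PROOFS =====

-- the multiset of group numbers of all (position, phrase) matches in tl
def pvS (tl : List Char) : List Nat :=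
  (List.range tl.length).flatMap
    (fun i => (pvPhrases.filter (fun pg => pg.1.toList.isPrefixOf (tl.drop i))).map Prod.snd)

theorem pv_inner_eq (tl : List Char) (i : Nat) (l : List (String × Nat)) :
    ∀ b : Nat, l.foldl
      (fun best pg => if pg.2 < best ∧ pg.1.toList.isPrefixOf (tl.drop i) then pg.2 else best) b
    = ((l.filter (fun pg => pg.1.toList.isPrefixOf (tl.drop i))).map Prod.snd).foldl min b := by
  induction l with
  | nil => intro b; rfl
  | cons pg l ih =>
    intro b
    simp only [List.foldl_cons]
    by_cases h : pg.1.toList.isPrefixOf (tl.drop i) = true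
    · simp only [List.filter_cons, h, if_true, List.map_cons, List.foldl_cons, ih]
      congr 1
      simp only [h, and_true]
      split_ifs with h2 <;> omega
    · simp only [List.filter_cons, h, if_false, ih, Bool.false_eq_true, and_false]

theorem pv_outer_eq {α : Type} (l : List α) (s : α → List Nat) :
    ∀ b : Nat, l.foldl (fun b i => (s i).foldl min b) b = (l.flatMap s).foldl min b := by
  induction l with
  | nil => intro b; rfl
  | cons a l ih => intro b; simp [List.foldl_cons, List.flatMap_cons, List.foldl_append, ih]

theorem pv_best_eq (text : String) :
    extract_verdict_alt text =
      (let best := (pvS (PySem.Str.lower text).toList).foldl min 5;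
       if best < 5 then pvLabels.getD best "Unknown" else "Unknown") := by
  unfold extract_verdict_alt pvS
  simp only [pv_inner_eq, pv_outer_eq]

theorem pv_foldl_min_le (S : List Nat) : ∀ b x, x ∈ S → S.foldl min b ≤ x := by
  induction S with
  | nil => intro _ _ h; cases h
  | cons a S ih =>
    intro b x h
    rcases List.mem_cons.mp h with rfl | h
    · calc S.foldl min (min b x) ≤ min b x := by
            clear ih h
            induction S generalizing b x with
            | nil => exact le_refl _
            | cons c S ih2 => exact le_trans (ih2 (min b x) c) (min_le_left _ _)
          _ ≤ x := min_le_right _ _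
    · exact ih _ _ h

theorem pv_foldl_min_mem (S : List Nat) : ∀ b, S.foldl min b = b ∨ S.foldl min b ∈ S := by
  induction S with
  | nil => intro b; exact Or.inl rfl
  | cons a S ih =>
    intro b
    simp only [List.foldl_cons]
    rcases ih (min b a) with h | h
    · rcases Nat.le_total b a with hba | hab
      · exact Or.inl (by rw [h, Nat.min_eq_left hba])
      · refine Or.inr ?_
        rw [h, Nat.min_eq_right hab]
        exact List.mem_cons_self ..
    · exact Or.inr (List.mem_cons_of_mem _ h)

-- a non-empty phrase occurs in t iff it starts at some index < len t
theorem pv_occ_iff (t p : String) (hp : p.toList ≠ []) :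
    (∃ i, i < t.toList.length ∧ p.toList.isPrefixOf (t.toList.drop i) = true) ↔
      PySem.Str.isIn p t = true := by
  rw [PySem.Str.isIn_iff_infix, ← PySem.Chars.isIn_iff_infix,
    ← PySem.Chars.exists_prefix_drop_iff_isIn]
  constructor
  · rintro ⟨i, _, h⟩; exact ⟨i, List.isPrefixOf_iff_prefix.mp h⟩
  · rintro ⟨j, h⟩
    by_cases hj : j < t.toList.length
    · exact ⟨j, hj, List.isPrefixOf_iff_prefix.mpr h⟩
    · exfalso
      rw [List.drop_eq_nil_of_le (Nat.le_of_not_lt hj)] at h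
      exact hp (List.prefix_nil.mp h)

theorem pv_mem_S_iff (tl : List Char) (x : Nat) :
    x ∈ pvS tl ↔ ∃ p : String, (p, x) ∈ pvPhrases ∧
      ∃ i, i < tl.length ∧ p.toList.isPrefixOf (tl.drop i) = true := by
  simp only [pvS, List.mem_flatMap, List.mem_range, List.mem_map, List.mem_filter]
  constructor
  · rintro ⟨i, hi, pg, ⟨hmem, hpref⟩, rfl⟩
    exact ⟨pg.1, by simpa using hmem, i, hi, hpref⟩
  · rintro ⟨p, hmem, i, hi, hpref⟩
    exact ⟨i, hi, (p, x), ⟨hmem, hpref⟩, rfl⟩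

-- g ∈ pvS tl iff some phrase of group g occurs in t (generic over the group's phrase list)
theorem pv_gmem_iff (t : String) (g : Nat) (ps : List String)
    (hps : ∀ p, (p, g) ∈ pvPhrases ↔ p ∈ ps) (hne : ∀ p ∈ ps, p.toList ≠ []) :
    (g ∈ pvS t.toList) ↔ (ps.any (fun p => PySem.Str.isIn p t)) = true := by
  rw [pv_mem_S_iff]
  simp only [List.any_eq_true]
  constructor
  · rintro ⟨p, hmem, hi⟩
    exact ⟨p, (hps p).mp hmem, (pv_occ_iff t p (hne p ((hps p).mp hmem))).mp hi⟩
  · rintro ⟨p, hmem, hi⟩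
    exact ⟨p, (hps p).mpr hmem, (pv_occ_iff t p (hne p hmem)).mpr hi⟩

theorem pv_g0 (t : String) : (0 ∈ pvS t.toList) ↔
    (["found guilty", "convicted of", "guilty verdict", "conviction for"].any
      (fun p => PySem.Str.isIn p t)) = true :=
  pv_gmem_iff t 0 _ (by intro p; simp [pvPhrases]) (by decide)

theorem pv_g1 (t : String) : (1 ∈ pvS t.toList) ↔
    (["not guilty", "acquitted", "acquittal", "charges dismissed"].any
      (fun p => PySem.Str.isIn p t)) = true :=
  pv_gmem_iff t 1 _ (by intro p; simp [pvPhrases]) (by decide)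

theorem pv_g2 (t : String) : (2 ∈ pvS t.toList) ↔
    (["plea deal", "plea bargain", "pled guilty", "pleaded guilty", "guilty plea"].any
      (fun p => PySem.Str.isIn p t)) = true :=
  pv_gmem_iff t 2 _ (by intro p; simp [pvPhrases]) (by decide)

theorem pv_g3 (t : String) : (3 ∈ pvS t.toList) ↔ PySem.Str.isIn "mistrial" t = true := by
  have := pv_gmem_iff t 3 ["mistrial"] (by intro p; simp [pvPhrases]) (by decide)
  simpa using this

theorem pv_g4 (t : String) : (4 ∈ pvS t.toList) ↔
    (["sentenced to", "prison term", "jail time"].any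
      (fun p => PySem.Str.isIn p t)) = true :=
  pv_gmem_iff t 4 _ (by intro p; simp [pvPhrases]) (by decide)

theorem pv_S_lt (tl : List Char) (x : Nat) (h : x ∈ pvS tl) : x < 5 := by
  rcases (pv_mem_S_iff tl x).mp h with ⟨p, hmem, -⟩
  simp only [pvPhrases, List.mem_cons, List.not_mem_nil, or_false, Prod.mk.injEq] at hmem
  omega

-- ===== VERDICT (by name: the statement is the Claim_ definition above) =====
theorem extract_verdict_spec : Claim_equal_extract_verdict := by
  intro text _
  unfold Spec_extract_verdict extract_verdict
  rw [pv_best_eq]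
  set t := PySem.Str.lower text with ht
  simp only []
  by_cases h0 : (["found guilty", "convicted of", "guilty verdict", "conviction for"].any
      (fun p => PySem.Str.isIn p t)) = true
  · have hb : (pvS t.toList).foldl min 5 = 0 :=
      Nat.le_zero.mp (pv_foldl_min_le _ 5 0 ((pv_g0 t).mpr h0))
    rw [if_pos h0, hb]
    decide
  by_cases h1 : (["not guilty", "acquitted", "acquittal", "charges dismissed"].any
      (fun p => PySem.Str.isIn p t)) = true
  · have hle := pv_foldl_min_le (pvS t.toList) 5 1 ((pv_g1 t).mpr h1)
    have hb : (pvS t.toList).foldl min 5 = 1 := by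
      rcases pv_foldl_min_mem (pvS t.toList) 5 with h | h
      · omega
      · have h5 := pv_S_lt _ _ h
        have : (pvS t.toList).foldl min 5 = 0 ∨ (pvS t.toList).foldl min 5 = 1 := by omega
        rcases this with h' | h'
        · exact absurd ((pv_g0 t).mp (h' ▸ h)) h0
        · exact h'
    rw [if_neg h0, if_pos h1, hb]
    decide
  by_cases h2 : (["plea deal", "plea bargain", "pled guilty", "pleaded guilty", "guilty plea"].any
      (fun p => PySem.Str.isIn p t)) = true
  · have hle := pv_foldl_min_le (pvS t.toList) 5 2 ((pv_g2 t).mpr h2)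
    have hb : (pvS t.toList).foldl min 5 = 2 := by
      rcases pv_foldl_min_mem (pvS t.toList) 5 with h | h
      · omega
      · have h5 := pv_S_lt _ _ h
        have : (pvS t.toList).foldl min 5 = 0 ∨ (pvS t.toList).foldl min 5 = 1 ∨
            (pvS t.toList).foldl min 5 = 2 := by omega
        rcases this with h' | h' | h'
        · exact absurd ((pv_g0 t).mp (h' ▸ h)) h0
        · exact absurd ((pv_g1 t).mp (h' ▸ h)) h1
        · exact h'
    rw [if_neg h0, if_neg h1, if_pos h2, hb]
    decide
  by_cases h3 : PySem.Str.isIn "mistrial" t = true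
  · have hle := pv_foldl_min_le (pvS t.toList) 5 3 ((pv_g3 t).mpr h3)
    have hb : (pvS t.toList).foldl min 5 = 3 := by
      rcases pv_foldl_min_mem (pvS t.toList) 5 with h | h
      · omega
      · have h5 := pv_S_lt _ _ h
        have : (pvS t.toList).foldl min 5 = 0 ∨ (pvS t.toList).foldl min 5 = 1 ∨
            (pvS t.toList).foldl min 5 = 2 ∨ (pvS t.toList).foldl min 5 = 3 := by omega
        rcases this with h' | h' | h' | h'
        · exact absurd ((pv_g0 t).mp (h' ▸ h)) h0
        · exact absurd ((pv_g1 t).mp (h' ▸ h)) h1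
        · exact absurd ((pv_g2 t).mp (h' ▸ h)) h2
        · exact h'
    rw [if_neg h0, if_neg h1, if_neg h2, if_pos h3, hb]
    decide
  by_cases h4 : (["sentenced to", "prison term", "jail time"].any
      (fun p => PySem.Str.isIn p t)) = true
  · have hle := pv_foldl_min_le (pvS t.toList) 5 4 ((pv_g4 t).mpr h4)
    have hb : (pvS t.toList).foldl min 5 = 4 := by
      rcases pv_foldl_min_mem (pvS t.toList) 5 with h | h
      · omega
      · have h5 := pv_S_lt _ _ h
        have : (pvS t.toList).foldl min 5 = 0 ∨ (pvS t.toList).foldl min 5 = 1 ∨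
            (pvS t.toList).foldl min 5 = 2 ∨ (pvS t.toList).foldl min 5 = 3 ∨
            (pvS t.toList).foldl min 5 = 4 := by omega
        rcases this with h' | h' | h' | h' | h'
        · exact absurd ((pv_g0 t).mp (h' ▸ h)) h0
        · exact absurd ((pv_g1 t).mp (h' ▸ h)) h1
        · exact absurd ((pv_g2 t).mp (h' ▸ h)) h2
        · exact absurd ((pv_g3 t).mp (h' ▸ h)) h3
        · exact h'
    rw [if_neg h0, if_neg h1, if_neg h2, if_neg h3, if_pos h4, hb]
    decide
  · have hb : (pvS t.toList).foldl min 5 = 5 := by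
      rcases pv_foldl_min_mem (pvS t.toList) 5 with h | h
      · exact h
      · have h5 := pv_S_lt _ _ h
        exfalso
        have : (pvS t.toList).foldl min 5 = 0 ∨ (pvS t.toList).foldl min 5 = 1 ∨
            (pvS t.toList).foldl min 5 = 2 ∨ (pvS t.toList).foldl min 5 = 3 ∨
            (pvS t.toList).foldl min 5 = 4 := by omega
        rcases this with h' | h' | h' | h' | h'
        · exact h0 ((pv_g0 t).mp (h' ▸ h))
        · exact h1 ((pv_g1 t).mp (h' ▸ h))
        · exact h2 ((pv_g2 t).mp (h' ▸ h))
        · exact h3 ((pv_g3 t).mp (h' ▸ h))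
        · exact h4 ((pv_g4 t).mp (h' ▸ h))
    rw [if_neg h0, if_neg h1, if_neg h2, if_neg h3, if_neg h4, hb]
    decide
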